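-- pv_equiv track=rewrite | github.com/garen-whaleforce/word-translation4 | tools/translate_pdf_range.py | _prune_vertical_merges_with_text
-- ===== SOURCE A (Python) =====
-- from typing import List, Tuple, Optional, Dict
--
-- def _prune_vertical_merges_with_text(rows: List[List[str]], merge_info: List[Dict]) -> List[Dict]:
--     """移除與現有文字衝突的垂直合併，避免誤合併"""
--     if not rows:
--         return merge_info
--     row_count = len(rows)
--     col_count = len(rows[0]) if rows else 0
--
--     pruned = []
--     for m in merge_info:
--         rowspan = m.get('rowspan', 1)
--         colspan = m.get('colspan', 1)
--         if rowspan <= 1: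
--             pruned.append(m)
--             continue
--         r0 = m['row']
--         c0 = m['col']
--         if r0 >= row_count or c0 >= col_count:
--             pruned.append(m)
--             continue
--
--         conflict = False
--         for dr in range(1, rowspan):
--             r = r0 + dr
--             if r >= row_count:
--                 break
--             cell_text = rows[r][c0] if c0 < len(rows[r]) else ""
--             if cell_text:
--                 conflict = True
--                 break
--
--         if conflict:
--             if colspan > 1:
--                 pruned.append({
--                     'row': r0,
--                     'col': c0,
--                     'rowspan': 1,
--                     'colspan': colspan,
--                 })
--             # colspan == 1 時直接丟棄垂直合併
--             continue
--
--         pruned.append(m)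
--     return pruned
-- ===== SOURCE B (Python) =====
-- from typing import List, Dict
--
-- def _prune_vertical_merges_with_text(rows: List[List[str]], merge_info: List[Dict]) -> List[Dict]:
--     if not rows:
--         return list(merge_info)
--     row_count = len(rows)
--     col_count = len(rows[0])
--
--     # prefix[c][i] = number of non-empty cells in column c among rows[0..i-1]
--     prefix = []
--     for c in range(col_count):
--         acc = [0]
--         t = 0
--         for row in rows:
--             if c < len(row) and row[c]:
--                 t += 1
--             acc.append(t)
--         prefix.append(acc)
--
--     out = []
--     for m in merge_info:
--         rowspan = m.get('rowspan', 1)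
--         if rowspan <= 1:
--             out.append(m)
--             continue
--         r0 = m['row']
--         c0 = m['col']
--         if r0 >= row_count or c0 >= col_count:
--             out.append(m)
--             continue
--         hi = min(r0 + rowspan - 1, row_count - 1)
--         if prefix[c0][hi + 1] - prefix[c0][r0 + 1] > 0:
--             colspan = m.get('colspan', 1)
--             if colspan > 1:
--                 out.append({'row': r0, 'col': c0, 'rowspan': 1, 'colspan': colspan})
--         else:
--             out.append(m)
--     return out
-- ===== Notes on version B (the rewrite author's own statement) =====
-- stated objective: alternative
-- what changed: B builds per-column prefix-sum tables of non-empty cells once, so each merge's vertical-conflict test becomes a single prefix difference instead of A's per-merge rescan of up to rowspan rows (a different traversal, not measured faster on the generated workload).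
-- outside the precondition, e.g. on _prune_vertical_merges_with_text([['a']], [{'rowspan': 2}]): A raises KeyError, B raises KeyError
import Mathlib
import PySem

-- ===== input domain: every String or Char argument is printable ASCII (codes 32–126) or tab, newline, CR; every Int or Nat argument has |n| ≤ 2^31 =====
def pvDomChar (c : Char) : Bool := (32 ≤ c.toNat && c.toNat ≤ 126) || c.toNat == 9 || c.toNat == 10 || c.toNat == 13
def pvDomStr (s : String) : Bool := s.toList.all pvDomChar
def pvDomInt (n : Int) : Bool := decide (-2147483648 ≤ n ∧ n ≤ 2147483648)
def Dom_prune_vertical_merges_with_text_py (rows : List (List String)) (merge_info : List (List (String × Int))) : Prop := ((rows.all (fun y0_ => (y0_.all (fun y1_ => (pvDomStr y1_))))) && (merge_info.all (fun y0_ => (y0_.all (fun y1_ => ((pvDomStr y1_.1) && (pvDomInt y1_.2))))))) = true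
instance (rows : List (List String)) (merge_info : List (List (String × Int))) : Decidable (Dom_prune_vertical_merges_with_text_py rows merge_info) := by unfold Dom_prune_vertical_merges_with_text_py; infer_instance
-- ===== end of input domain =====

-- B replaces A's per-merge rescan of the merged rows with per-column prefix-sum tables built once,
-- so each merge's conflict test becomes one subtraction (objective: alternative algorithm, same cost class).

-- ===== PORT A =====
-- dict helpers for A (assoc list, first-match lookup): m.get(k, d) and m[k]
def aGetD (m : List (String × Int)) (k : String) (d : Int) : Int :=
  ((m.find? (fun p => p.1 == k)).map (·.2)).getD d

def aGet? (m : List (String × Int)) (k : String) : Option Int :=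
  (m.find? (fun p => p.1 == k)).map (·.2)

-- cell_text = rows[r][c0] if c0 < len(rows[r]) else ""   (getD "" only fires outside Pre_, where Python raises)
def pyACell (rows : List (List String)) (r c0 : Int) : String :=
  match PySem.List.pyGet? rows r with
  | none => ""
  | some row => if c0 < (row.length : Int) then (PySem.List.pyGet? row c0).getD "" else ""

-- the inner 'for dr in range(1, rowspan)' loop with its two breaks
def aConflict (rows : List (List String)) (r0 c0 row_count : Int) : List Int → Bool
  | [] => false
  | dr :: rest =>
      let r := r0 + dr
      if r ≥ row_count then false
      else if pyACell rows r c0 = "" then aConflict rows r0 c0 row_count rest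
      else true

def prune_vertical_merges_with_text_py (rows : List (List String)) (merge_info : List (List (String × Int))) : List (List (String × Int)) :=
  match rows with
  | [] => merge_info
  | r0row :: _ =>
    let row_count : Int := rows.length
    let col_count : Int := r0row.length
    merge_info.foldl (fun pruned m =>
      let rowspan := aGetD m "rowspan" 1
      let colspan := aGetD m "colspan" 1
      if rowspan ≤ 1 then pruned ++ [m]
      else
        match aGet? m "row", aGet? m "col" with
        | some r0, some c0 =>
          if r0 ≥ row_count ∨ c0 ≥ col_count then pruned ++ [m]
          else
            let conflict := aConflict rows r0 c0 row_count (PySem.List.pyRange 1 rowspan 1)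
            if conflict then
              if colspan > 1 then
                pruned ++ [[("row", r0), ("col", c0), ("rowspan", 1), ("colspan", colspan)]]
              else pruned
            else pruned ++ [m]
        | _, _ => pruned ++ [m]   -- KeyError in Python; excluded by Pre_
      ) []

-- ===== PORT B =====
-- dict helpers for B (assoc list, first-match lookup): m.get(k, d) and m[k]
def bGetD (m : List (String × Int)) (k : String) (d : Int) : Int :=
  ((m.find? (fun p => p.1 == k)).map (·.2)).getD d

def bGet? (m : List (String × Int)) (k : String) : Option Int :=
  (m.find? (fun p => p.1 == k)).map (·.2)

-- one column's prefix list: acc[i] = number of non-empty cells in column c among rows[0..i-1]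
def bColPrefix (rows : List (List String)) (c : Int) : List Int :=
  (rows.foldl (fun (p : List Int × Int) row =>
      let t := if c < (row.length : Int) ∧ (PySem.List.pyGet? row c).getD "" ≠ "" then p.2 + 1 else p.2
      (p.1 ++ [t], t)) ([0], 0)).1

def prune_vertical_merges_with_text_py_alt (rows : List (List String)) (merge_info : List (List (String × Int))) : List (List (String × Int)) :=
  match rows with
  | [] => merge_info
  | r0row :: _ =>
    let row_count : Int := rows.length
    let col_count : Int := r0row.length
    let pfx := (PySem.List.pyRange 0 col_count 1).map (fun c => bColPrefix rows c)
    merge_info.foldl (fun out m =>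
      let rowspan := bGetD m "rowspan" 1
      if rowspan ≤ 1 then out ++ [m]
      else
        match bGet? m "row" with
        | none => out ++ [m]   -- KeyError in Python; excluded by Pre_
        | some r0 =>
          match bGet? m "col" with
          | none => out ++ [m]
          | some c0 =>
          if r0 ≥ row_count ∨ c0 ≥ col_count then out ++ [m]
          else
            let hi := min (r0 + rowspan - 1) (row_count - 1)
            let col := (PySem.List.pyGet? pfx c0).getD []
            if (PySem.List.pyGet? col (hi + 1)).getD 0 - (PySem.List.pyGet? col (r0 + 1)).getD 0 > 0 then
              let colspan := bGetD m "colspan" 1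
              if colspan > 1 then
                out ++ [[("row", r0), ("col", c0), ("rowspan", 1), ("colspan", colspan)]]
              else out
            else out ++ [m]
      ) []

-- ===== PRECONDITION & SPEC =====
-- Pre_ excludes merges whose rowspan exceeds 1 but whose 'row'/'col' keys are missing (A raises
-- KeyError) or negative (A mixes Python negative-index wraparound over ragged rows with IndexError;
-- where it returns, that wraparound answer is an accident of the representation).
-- dict helpers for Pre_ (assoc list, first-match lookup)
def pGetD (m : List (String × Int)) (k : String) (d : Int) : Int :=
  ((m.find? (fun p => p.1 == k)).map (·.2)).getD d

def pGet? (m : List (String × Int)) (k : String) : Option Int :=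
  (m.find? (fun p => p.1 == k)).map (·.2)

def preOk (m : List (String × Int)) : Bool :=
  (((pGet? m "row").map (fun r => decide (0 ≤ r))).getD false)
    && (((pGet? m "col").map (fun c => decide (0 ≤ c))).getD false)

def Pre_prune_vertical_merges_with_text_py (rows : List (List String)) (merge_info : List (List (String × Int))) : Prop :=
  ∀ m ∈ merge_info, pGetD m "rowspan" 1 > 1 → preOk m = true
instance (rows : List (List String)) (merge_info : List (List (String × Int))) : Decidable (Pre_prune_vertical_merges_with_text_py rows merge_info) := by unfold Pre_prune_vertical_merges_with_text_py; infer_instance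

def pvWitness_prune_vertical_merges_with_text_py : List (List String) × (List (List (String × Int))) :=
  ([["a", ""], ["", "b"]], [[("row", 0), ("col", 0), ("rowspan", 2)], [("row", 0), ("col", 1), ("rowspan", 2), ("colspan", 2)]])

def Spec_prune_vertical_merges_with_text_py (rows : List (List String)) (merge_info : List (List (String × Int))) (out : List (List (String × Int))) : Prop := out = prune_vertical_merges_with_text_py_alt rows merge_info
instance (rows : List (List String)) (merge_info : List (List (String × Int))) (out : List (List (String × Int))) : Decidable (Spec_prune_vertical_merges_with_text_py rows merge_info out) := by unfold Spec_prune_vertical_merges_with_text_py; infer_instance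

-- ===== CLAIM (what is proved, stated in full; the proofs are below) =====
def Claim_equal_prune_vertical_merges_with_text_py : Prop := ∀ (rows : List (List String)) (merge_info : List (List (String × Int))), Dom_prune_vertical_merges_with_text_py rows merge_info → Pre_prune_vertical_merges_with_text_py rows merge_info → Spec_prune_vertical_merges_with_text_py rows merge_info (prune_vertical_merges_with_text_py rows merge_info)

-- ===== LEMMAS AND PROOFS =====

-- the three helper copies compute the same first-match lookup
lemma bGetD_eq (m : List (String × Int)) (k : String) (d : Int) : bGetD m k d = aGetD m k d := rfl
lemma bGet?_eq (m : List (String × Int)) (k : String) : bGet? m k = aGet? m k := rfl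
lemma pGetD_eq (m : List (String × Int)) (k : String) (d : Int) : pGetD m k d = aGetD m k d := rfl
lemma pGet?_eq (m : List (String × Int)) (k : String) : pGet? m k = aGet? m k := rfl

-- a cell counts as non-empty text (Python truthiness of `rows[r][c0] if c0 < len(rows[r]) else ""`)
def cellB (c0 : Int) (row : List String) : Bool :=
  decide (c0 < (row.length : Int) ∧ (PySem.List.pyGet? row c0).getD "" ≠ "")

-- number of non-empty cells in column c0 among the first i rows
def cntC (rows : List (List String)) (c0 : Int) (i : Nat) : Int :=
  ((rows.take i).countP (cellB c0) : Int)

lemma bColPrefix_aux (c : Int) (l : List (List String)) : ∀ (acc : List Int) (t : Int),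
    (l.foldl (fun (p : List Int × Int) row =>
      let t := if c < (row.length : Int) ∧ (PySem.List.pyGet? row c).getD "" ≠ "" then p.2 + 1 else p.2
      (p.1 ++ [t], t)) (acc, t)).1
    = acc ++ (List.range l.length).map (fun i => t + ((l.take (i+1)).countP (cellB c) : Int)) := by
  induction l with
  | nil => intro acc t; simp
  | cons row rest ih =>
    intro acc t
    rw [List.foldl_cons]
    show (rest.foldl _ (acc ++ [_], _)).1 = _
    rw [ih]
    rw [List.length_cons, List.range_succ_eq_map]
    by_cases hc : c < ((row : List String).length : Int) ∧ (PySem.List.pyGet? row c).getD "" ≠ ""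
    · simp [hc, cellB, List.take_succ_cons, List.append_assoc, Nat.succ_eq_add_one]
      intro a _
      omega
    · simp [hc, cellB, List.take_succ_cons, List.append_assoc, Nat.succ_eq_add_one]

lemma bColPrefix_eq (rows : List (List String)) (c : Int) :
    bColPrefix rows c = (List.range (rows.length + 1)).map (fun i => cntC rows c i) := by
  unfold bColPrefix
  rw [bColPrefix_aux]
  rw [List.range_succ_eq_map]
  simp [cntC]

lemma bColPrefix_get (rows : List (List String)) (c : Int) (i : Int) (h0 : 0 ≤ i)
    (h1 : i ≤ (rows.length : Int)) :
    PySem.List.pyGet? (bColPrefix rows c) i = some (cntC rows c i.toNat) := by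
  rw [bColPrefix_eq, PySem.List.pyGet?_of_nonneg _ h0]
  have hi : i.toNat < rows.length + 1 := by omega
  simp [List.getElem?_map, List.getElem?_range hi]

-- A's cell test as a boolean on the actual row
lemma pyACell_ne_iff (rows : List (List String)) (r c0 : Int) (h0 : 0 ≤ r)
    (h1 : r < (rows.length : Int)) :
    (pyACell rows r c0 ≠ "") ↔ cellB c0 (rows.getD r.toNat []) = true := by
  have hr : r.toNat < rows.length := by omega
  rw [List.getD_eq_getElem rows [] hr]
  unfold pyACell
  rw [PySem.List.pyGet?_eq_some_getElem _ h0 h1]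
  by_cases hc : c0 < ((rows[r.toNat] : List String).length : Int)
  · simp [hc, cellB]
  · simp [hc, cellB]

-- the inner break-loop of A, characterised
lemma aConflict_iff (rows : List (List String)) (r0 c0 : Int) (hr0 : 0 ≤ r0) :
    ∀ (fuel : Nat) (d rowspan : Int), (rowspan - d).toNat = fuel → 1 ≤ d →
    (aConflict rows r0 c0 (rows.length) (PySem.List.pyRange d rowspan 1) = true ↔
      ∃ r : Int, r0 + d ≤ r ∧ r < r0 + rowspan ∧ r < (rows.length : Int) ∧
        cellB c0 (rows.getD r.toNat []) = true) := by
  intro fuel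
  induction fuel with
  | zero =>
    intro d rowspan hf hd
    have hba : rowspan ≤ d := by omega
    rw [PySem.List.pyRange_one_eq_nil hba]
    simp only [aConflict]
    constructor
    · intro h; cases h
    · rintro ⟨r, h1, h2, -, -⟩; omega
  | succ n ihn =>
    intro d rowspan hf hd
    have hab : d < rowspan := by omega
    rw [PySem.List.pyRange_one_cons hab]
    simp only [aConflict]
    by_cases hbr : r0 + d ≥ (rows.length : Int)
    · rw [if_pos hbr]
      constructor
      · intro h; cases h
      · rintro ⟨r, h1, h2, h3, -⟩; omega
    · rw [if_neg hbr]
      by_cases hcell : pyACell rows (r0 + d) c0 = ""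
      · rw [if_pos hcell, ihn (d+1) rowspan (by omega) (by omega)]
        constructor
        · rintro ⟨r, h1, h2, h3, h4⟩; exact ⟨r, by omega, h2, h3, h4⟩
        · rintro ⟨r, h1, h2, h3, h4⟩
          refine ⟨r, ?_, h2, h3, h4⟩
          rcases eq_or_lt_of_le h1 with heq | hlt
          · exfalso
            rw [← heq] at h4
            rw [← pyACell_ne_iff rows (r0+d) c0 (by omega) (by omega)] at h4
            exact h4 hcell
          · omega
      · rw [if_neg hcell]
        simp only [true_iff]
        exact ⟨r0 + d, by omega, by omega, by omega,
          (pyACell_ne_iff rows (r0+d) c0 (by omega) (by omega)).mp hcell⟩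

lemma cnt_diff_pos_iff (rows : List (List String)) (c0 : Int) (a b : Nat) (hab : a ≤ b)
    (hb : b ≤ rows.length) :
    (0 < cntC rows c0 b - cntC rows c0 a) ↔
      ∃ r : Nat, a ≤ r ∧ r < b ∧ cellB c0 (rows.getD r []) = true := by
  unfold cntC
  have hsplit : rows.take b = rows.take a ++ ((rows.drop a).take (b - a)) := by
    conv_lhs => rw [show b = a + (b - a) by omega]
    exact List.take_add
  rw [hsplit, List.countP_append]
  push_cast
  constructor
  · intro h
    have hpos : 0 < List.countP (cellB c0) ((rows.drop a).take (b - a)) := by omega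
    obtain ⟨x, hxmem, hx⟩ := List.countP_pos_iff.mp hpos
    obtain ⟨j, hj, hxj⟩ := List.mem_iff_getElem.mp hxmem
    have hjlt : j < b - a ∧ a + j < rows.length := by
      simp [List.length_take, List.length_drop] at hj; omega
    refine ⟨a + j, by omega, by omega, ?_⟩
    rw [List.getD_eq_getElem rows [] (by omega)]
    rw [← hxj] at hx
    simpa [List.getElem_take, List.getElem_drop] using hx
  · rintro ⟨r, h1, h2, h3⟩
    have hrlen : r < rows.length := by omega
    rw [List.getD_eq_getElem rows [] hrlen] at h3
    have hmem : rows[r] ∈ (rows.drop a).take (b - a) := by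
      rw [List.mem_iff_getElem]
      refine ⟨r - a, by simp [List.length_take, List.length_drop]; omega, ?_⟩
      simp only [List.getElem_take, List.getElem_drop]
      congr 1
      omega
    have := List.countP_pos_iff.mpr ⟨_, hmem, h3⟩
    omega

lemma pfx_get (rows : List (List String)) (cc c0 : Int) (h0 : 0 ≤ c0) (h1 : c0 < cc) :
    PySem.List.pyGet? ((PySem.List.pyRange 0 cc 1).map (fun c => bColPrefix rows c)) c0
      = some (bColPrefix rows c0) := by
  rw [PySem.List.pyRange_one, List.map_map, PySem.List.pyGet?_of_nonneg _ h0]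
  have hc : c0.toNat < (cc - 0).toNat := by omega
  simp only [List.getElem?_map, Function.comp]
  rw [List.getElem?_range hc]
  simp [Int.toNat_of_nonneg h0]

-- the core equivalence: A's rescan conflict loop ⟺ B's prefix-difference test
lemma conflict_iff_diff (rows : List (List String)) (r0 c0 rowspan : Int) (hrows : rows ≠ [])
    (h0r : 0 ≤ r0) (h0c : 0 ≤ c0) (hrn : r0 < (rows.length : Int)) (hrs : 1 < rowspan) :
    (aConflict rows r0 c0 (rows.length) (PySem.List.pyRange 1 rowspan 1) = true) ↔
      (0 < cntC rows c0 (min (r0 + rowspan - 1) ((rows.length : Int) - 1) + 1).toNat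
            - cntC rows c0 (r0 + 1).toNat) := by
  have hn : 1 ≤ (rows.length : Int) := by
    rcases rows with _ | ⟨a, l⟩
    · exact absurd rfl hrows
    · simp
  set hi := min (r0 + rowspan - 1) ((rows.length : Int) - 1) with hhi
  have hhir : r0 ≤ hi := by omega
  rw [aConflict_iff rows r0 c0 h0r (rowspan - 1).toNat 1 rowspan (by omega) le_rfl]
  rw [cnt_diff_pos_iff rows c0 (r0 + 1).toNat (hi + 1).toNat (by omega) (by omega)]
  constructor
  · rintro ⟨r, h1, h2, h3, h4⟩
    exact ⟨r.toNat, by omega, by omega, h4⟩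
  · rintro ⟨r, h1, h2, h3⟩
    refine ⟨(r : Int), by omega, by omega, by omega, ?_⟩
    simpa using h3

-- ===== VERDICT (by name: the statement is the Claim_ definition above) =====
theorem prune_vertical_merges_with_text_py_spec : Claim_equal_prune_vertical_merges_with_text_py := by
  intro rows mi hdom hpre
  unfold Spec_prune_vertical_merges_with_text_py
  cases rows with
  | nil => rfl
  | cons row0 rest =>
    simp only [prune_vertical_merges_with_text_py, prune_vertical_merges_with_text_py_alt]
    apply PySem.List.foldl_congr_mem
    intro acc m hm
    simp only [bGetD_eq, bGet?_eq]
    by_cases h1 : aGetD m "rowspan" 1 ≤ 1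
    · simp [h1]
    · have hp := hpre m hm (by rw [pGetD_eq]; omega)
      rcases hrow : aGet? m "row" with _ | r0 <;> rcases hcol : aGet? m "col" with _ | c0 <;>
        simp only [preOk, pGet?_eq, hrow, hcol, Option.map_none, Option.map_some,
          Option.getD_none, Option.getD_some, Bool.false_and, Bool.and_false,
          h1, if_false] at hp ⊢
      obtain ⟨h0r, h0c⟩ : 0 ≤ r0 ∧ 0 ≤ c0 := by simpa using hp
      by_cases hg : (r0 ≥ (((row0 :: rest).length : Nat) : Int) ∨ c0 ≥ ((row0.length : Nat) : Int))
      · rw [if_pos hg, if_pos hg]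
      · rw [if_neg hg, if_neg hg]
        push_neg at hg
        obtain ⟨hgr, hgc⟩ := hg
        have e1 := pfx_get (row0 :: rest) ((row0.length : Nat) : Int) c0 h0c hgc
        have e2 := bColPrefix_get (row0 :: rest) c0
          (min (r0 + aGetD m "rowspan" 1 - 1) ((((row0 :: rest).length : Nat) : Int) - 1) + 1)
          (by omega) (by omega)
        have e3 := bColPrefix_get (row0 :: rest) c0 (r0 + 1) (by omega) (by omega)
        simp only [e1, Option.getD_some, e2, e3]
        have hiff := conflict_iff_diff (row0 :: rest) r0 c0 (aGetD m "rowspan" 1)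
          (by simp) h0r h0c hgr (by omega)
        by_cases hcf : aConflict (row0 :: rest) r0 c0 (((row0 :: rest).length : Nat) : Int)
            (PySem.List.pyRange 1 (aGetD m "rowspan" 1) 1) = true
        · rw [if_pos hcf, if_pos (hiff.mp hcf)]
        · rw [if_neg hcf, if_neg (fun h => hcf (hiff.mpr h))]
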